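-- pv_equiv track=rewrite | github.com/cepalium/daily-coding-problems | python/111.py | indicesStartingAnagram
-- ===== SOURCE A (Python) =====
-- def indicesStartingAnagram(S, W):
--     # input:  string S & word W
--     # output: list of all starting indices in S which are anagrams of W
--     # running time: O(n*m*log m) where n=len(S) & m=len(W)
--     # instance variables
--     n_s = len(S)
--     n_w = len(W)
--     # output list initialized
--     l = []
--     for j in range(0, n_s - n_w + 1):
--         if isAnagram(S[j : j + n_w], W):
--             l.append(j)
--     return l
--
-- def isAnagram(s1, s2):
--     # input: 2 string s1 & s2
--     # output: returns boolean True if s1 is anagram of s2; otherwise False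
--     # running: O(m*log m), where m=len(string)
--     if len(s1) != len(s2):
--         return False
--     # create 2 sorted lists of characters from 2 input strings
--     c1 = sorted(list(s1))
--     c2 = sorted(list(s2))
--     if c1 != c2:  # 2 lists are not equal
--         return False
--     return True
-- ===== SOURCE B (Python) =====
-- def indicesStartingAnagram(S, W):
--     # count characters of W once, then test each window by character counts
--     # (count-based window test instead of sorting)
--     n_s = len(S)
--     n_w = len(W)
--     target = {}
--     for c in W:
--         target[c] = target.get(c, 0) + 1
--     l = []
--     for j in range(0, n_s - n_w + 1):
--         window = {}
--         ok = True
--         for c in S[j : j + n_w]: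
--             if target.get(c, 0) == 0:
--                 ok = False
--                 break
--             window[c] = window.get(c, 0) + 1
--         if ok:
--             for c in W:
--                 if window.get(c, 0) != target.get(c, 0):
--                     ok = False
--                     break
--         if ok:
--             l.append(j)
--     return l
-- ===== Notes on version B (the rewrite author's own statement) =====
-- stated objective: alternative
-- what changed: Replaces the per-window sort-both-strings anagram test by a character-count table of W built once, each window checked by counting its characters (with early exit on a char absent from W) and comparing counts.
import Mathlib
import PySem

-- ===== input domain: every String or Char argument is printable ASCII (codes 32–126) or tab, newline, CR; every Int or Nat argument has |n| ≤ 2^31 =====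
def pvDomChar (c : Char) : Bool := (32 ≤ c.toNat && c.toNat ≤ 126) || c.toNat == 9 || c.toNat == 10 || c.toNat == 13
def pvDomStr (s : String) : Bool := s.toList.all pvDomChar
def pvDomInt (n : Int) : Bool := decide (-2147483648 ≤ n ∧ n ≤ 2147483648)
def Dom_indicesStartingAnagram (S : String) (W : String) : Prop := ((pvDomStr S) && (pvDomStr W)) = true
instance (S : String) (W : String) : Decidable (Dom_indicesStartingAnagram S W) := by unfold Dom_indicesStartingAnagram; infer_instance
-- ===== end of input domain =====

-- B replaces the per-window sort-and-compare anagram test by a per-window character-count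
-- comparison against a count table of W built once (alternative algorithm: counting instead of sorting).

-- ===== PORT A =====
-- isAnagram(s1, s2): length check, then compare sorted character lists
def pvIsAnagram (s1 s2 : List Char) : Bool :=
  if s1.length ≠ s2.length then false
  else if PySem.List.sorted s1 (fun x => x) false ≠ PySem.List.sorted s2 (fun x => x) false then false
  else true

def indicesStartingAnagram (S : String) (W : String) : List Int :=
  let n_s : Int := PySem.Str.len S
  let n_w : Int := PySem.Str.len W
  (PySem.List.pyRange 0 (n_s - n_w + 1) 1).foldl
    (fun l j =>
      if pvIsAnagram (PySem.List.slice S.toList (some j) (some (j + n_w))) W.toList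
      then l ++ [j] else l) []

-- ===== PORT B =====
-- the 'for c in window: if target.get(c,0)==0: break; window[c]+=1' loop (break = none)
def pvScanWin (target : PySem.Dict Char Int) : List Char → PySem.Dict Char Int → Option (PySem.Dict Char Int)
  | [], w => some w
  | c :: cs, w =>
      if target.getD c 0 == 0 then none
      else pvScanWin target cs (w.insert c (w.getD c 0 + 1))

def indicesStartingAnagram_alt (S : String) (W : String) : List Int :=
  let n_s : Int := PySem.Str.len S
  let n_w : Int := PySem.Str.len W
  let target : PySem.Dict Char Int :=
    W.toList.foldl (fun d c => d.insert c (d.getD c 0 + 1)) PySem.Dict.empty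
  (PySem.List.pyRange 0 (n_s - n_w + 1) 1).foldl
    (fun l j =>
      match pvScanWin target (PySem.List.slice S.toList (some j) (some (j + n_w))) PySem.Dict.empty with
      | none => l
      | some win =>
          if W.toList.all (fun c => win.getD c 0 == target.getD c 0)
          then l ++ [j] else l) []

-- ===== PRECONDITION & SPEC =====
def Spec_indicesStartingAnagram (S : String) (W : String) (out : List Int) : Prop := out = indicesStartingAnagram_alt S W
instance (S : String) (W : String) (out : List Int) : Decidable (Spec_indicesStartingAnagram S W out) := by unfold Spec_indicesStartingAnagram; infer_instance

-- ===== CLAIM (what is proved, stated in full; the proofs are below) =====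
def Claim_equal_indicesStartingAnagram : Prop := ∀ (S : String) (W : String), Dom_indicesStartingAnagram S W → Spec_indicesStartingAnagram S W (indicesStartingAnagram S W)

-- ===== LEMMAS AND PROOFS =====

-- pvScanWin is a guarded foldl: some of the count-accumulating foldl iff no char of t has target count 0
theorem pvScanWin_eq (target : PySem.Dict Char Int) (t : List Char) (w : PySem.Dict Char Int) :
    pvScanWin target t w =
      if t.all (fun c => !(target.getD c 0 == 0))
      then some (t.foldl (fun d c => d.insert c (d.getD c 0 + 1)) w)
      else none := by
  induction t generalizing w with
  | nil => simp [pvScanWin]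
  | cons c cs ih =>
      simp only [pvScanWin, List.all_cons, List.foldl_cons]
      by_cases h : target.getD c 0 == 0
      · simp [h]
      · simp [h, ih]

theorem pvIsAnagram_iff_perm (t w : List Char) :
    pvIsAnagram t w = true ↔ t.Perm w := by
  unfold pvIsAnagram
  split_ifs with h1 h2
  · simp only [false_iff]
    exact fun hp => h1 hp.length_eq
  · simp only [false_iff]
    exact fun hp => h2 ((PySem.List.sorted_id_eq_sorted_id_iff_perm t w).mpr hp)
  · rw [not_not] at h2
    exact iff_of_true rfl ((PySem.List.sorted_id_eq_sorted_id_iff_perm t w).mp h2)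

-- B's per-window check decides the permutation property
theorem bCheck_iff_perm (t w : List Char) :
    (match pvScanWin (w.foldl (fun d c => d.insert c (d.getD c 0 + 1)) PySem.Dict.empty)
            t PySem.Dict.empty with
      | none => false
      | some win =>
          w.all (fun c => win.getD c 0 == (w.foldl (fun d c => d.insert c (d.getD c 0 + 1)) PySem.Dict.empty).getD c 0)) = true
    ↔ t.Perm w := by
  have htg : (w.foldl (fun d c => d.insert c (d.getD c 0 + 1)) PySem.Dict.empty) = PySem.Dict.counter w :=
    PySem.Dict.foldl_insert_getD_add_one_eq_counter w
  rw [htg, pvScanWin_eq]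
  by_cases hall : t.all (fun c => !((PySem.Dict.counter w).getD c 0 == 0))
  · have hmem : ∀ c ∈ t, c ∈ w := by
      intro c hc
      have := (List.all_eq_true.mp hall) c hc
      simp only [PySem.Dict.getD_counter, Bool.not_eq_true', beq_eq_false_iff_ne, ne_eq,
        Nat.cast_eq_zero] at this
      exact List.count_pos_iff.mp (Nat.pos_of_ne_zero this)
    have hwin : ∀ c, ((t.foldl (fun d c => d.insert c (d.getD c 0 + 1)) PySem.Dict.empty).getD c 0)
        = (t.count c : Int) := by
      intro c
      rw [PySem.Dict.getD_foldl_insert_add_one]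
      show (0 : Int) + _ = _
      ring
    simp only [hall, if_pos, List.all_eq_true]
    constructor
    · intro h
      rw [List.perm_iff_count]
      intro c
      by_cases hcw : c ∈ w
      · have := h c hcw
        rw [hwin c, PySem.Dict.getD_counter] at this
        exact_mod_cast beq_iff_eq.mp this
      · have h1 : w.count c = 0 := List.count_eq_zero.mpr hcw
        have h2 : t.count c = 0 := List.count_eq_zero.mpr (fun hct => hcw (hmem c hct))
        rw [h1, h2]
    · intro hp c _
      rw [hwin c, PySem.Dict.getD_counter]
      exact beq_iff_eq.mpr (by exact_mod_cast (List.perm_iff_count.mp hp c))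
  · simp only [hall, Bool.false_eq_true, if_false, false_iff]
    intro hp
    apply hall
    rw [List.all_eq_true]
    intro c hc
    have hcw : c ∈ w := hp.mem_iff.mp hc
    have hpos := List.count_pos_iff.mpr hcw
    simp only [PySem.Dict.getD_counter, Bool.not_eq_true', beq_eq_false_iff_ne, ne_eq,
      Nat.cast_eq_zero]
    omega

-- ===== VERDICT (by name: the statement is the Claim_ definition above) =====
theorem indicesStartingAnagram_spec : Claim_equal_indicesStartingAnagram := by
  intro S W _
  unfold Spec_indicesStartingAnagram indicesStartingAnagram indicesStartingAnagram_alt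
  apply PySem.List.foldl_congr_mem
  intro l j hj
  obtain ⟨hj0, hjlt⟩ := (PySem.List.mem_pyRange_one).mp hj
  -- the window has exactly n_w characters
  have hlen : (PySem.List.slice S.toList (some j) (some (j + PySem.Str.len W))).length
      = W.toList.length := by
    rw [PySem.List.slice_toNat _ hj0 (by simp [PySem.Str.len] at *; omega)]
    simp [PySem.Str.len] at *
    omega
  have key : pvIsAnagram (PySem.List.slice S.toList (some j) (some (j + PySem.Str.len W))) W.toList
      = (match pvScanWin (W.toList.foldl (fun d c => d.insert c (d.getD c 0 + 1)) PySem.Dict.empty)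
            (PySem.List.slice S.toList (some j) (some (j + PySem.Str.len W))) PySem.Dict.empty with
         | none => false
         | some win => W.toList.all (fun c => win.getD c 0 == (W.toList.foldl (fun d c => d.insert c (d.getD c 0 + 1)) PySem.Dict.empty).getD c 0)) := by
    rw [Bool.eq_iff_iff, pvIsAnagram_iff_perm, bCheck_iff_perm]
  rw [key]
  cases h : pvScanWin (W.toList.foldl (fun d c => d.insert c (d.getD c 0 + 1)) PySem.Dict.empty)
      (PySem.List.slice S.toList (some j) (some (j + PySem.Str.len W))) PySem.Dict.empty <;> simp
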